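-- pv_equiv track=rewrite | github.com/jtonini/fileiotest | load_config.py | _collapse_arrays
-- ===== SOURCE A (Python) =====
-- def _collapse_arrays(text: str) -> str:
--     result = []
--     in_array = False
--     array_buf = []
--     for line in text.splitlines():
--         stripped = line.strip()
--         if in_array:
--             array_buf.append(stripped)
--             if ']' in stripped:
--                 result.append(' '.join(array_buf))
--                 array_buf = []
--                 in_array = False
--         elif '= [' in stripped and ']' not in stripped:
--             in_array = True
--             array_buf = [stripped]
--         else:
--             result.append(stripped)
--     if array_buf:
--         result.append(' '.join(array_buf))
--     return '\n'.join(result)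
-- ===== SOURCE B (Python) =====
-- def _collapse_arrays(text: str) -> str:
--     lines = [l.strip() for l in text.splitlines()]
--
--     def find_first(ls, pred):
--         for i, l in enumerate(ls):
--             if pred(l):
--                 return i
--         return None
--
--     def collapse(ls):
--         i = find_first(ls, lambda l: '= [' in l and ']' not in l)
--         if i is None:
--             return ls
--         tail = ls[i:]
--         k = find_first(tail[1:], lambda l: ']' in l)
--         if k is None:
--             return ls[:i] + [' '.join(tail)]
--         return ls[:i] + [' '.join(tail[:k + 2])] + collapse(tail[k + 2:])
--
--     return '\n'.join(collapse(lines))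
-- ===== Notes on version B (the rewrite author's own statement) =====
-- stated objective: alternative
-- what changed: Replaces A's single-pass in_array/buffer state machine by a search-and-splice recursion: find the index of the next array-opening line, find its closing line, copy the untouched prefix wholesale, splice in the space-joined block, and recurse on the remaining suffix.
import Mathlib
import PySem

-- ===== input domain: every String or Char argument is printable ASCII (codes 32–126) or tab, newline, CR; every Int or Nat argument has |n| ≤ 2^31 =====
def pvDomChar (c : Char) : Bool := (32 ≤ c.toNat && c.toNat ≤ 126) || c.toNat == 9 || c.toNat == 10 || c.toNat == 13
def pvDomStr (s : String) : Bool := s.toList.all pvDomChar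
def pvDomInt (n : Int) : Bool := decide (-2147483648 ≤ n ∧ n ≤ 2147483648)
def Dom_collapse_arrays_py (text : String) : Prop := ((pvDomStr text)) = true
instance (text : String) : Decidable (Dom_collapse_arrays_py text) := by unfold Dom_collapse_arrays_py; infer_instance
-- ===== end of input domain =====

-- B replaces A's in_array/buffer state machine by a search-and-splice recursion
-- (find next opener, find its closer, splice in the joined block, recurse on the suffix); objective: alternative.

-- ===== PORT A =====
-- state: (result, in_array, array_buf)
def caStepA (st : List String × Bool × List String) (line : String) :
    List String × Bool × List String :=
  let stripped := PySem.Str.strip line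
  if st.2.1 then
    let buf := st.2.2 ++ [stripped]
    if PySem.Str.isIn "]" stripped then
      (st.1 ++ [PySem.Str.join " " buf], false, [])
    else
      (st.1, true, buf)
  else if PySem.Str.isIn "= [" stripped && !PySem.Str.isIn "]" stripped then
    (st.1, true, [stripped])
  else
    (st.1 ++ [stripped], false, st.2.2)

def collapse_arrays_py (text : String) : String :=
  let st := (PySem.Str.splitlines text).foldl caStepA ([], false, [])
  let res := if st.2.2 ≠ [] then st.1 ++ [PySem.Str.join " " st.2.2] else st.1
  PySem.Str.join "\n" res

-- ===== PORT B =====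
-- the two predicates B searches with
def cbOpener (l : String) : Bool := PySem.Str.isIn "= [" l && !PySem.Str.isIn "]" l
def cbCloser (l : String) : Bool := PySem.Str.isIn "]" l

-- Python's find_first: first index satisfying the predicate, None if absent
def cbFindFirst (p : String → Bool) : List String → Option Nat
  | [] => none
  | l :: rest => if p l then some 0 else (cbFindFirst p rest).map (· + 1)

theorem cbFindFirst_ne_nil {p : String → Bool} {ls : List String} {i : Nat}
    (h : cbFindFirst p ls = some i) : 0 < ls.length := by
  cases ls with
  | nil => simp [cbFindFirst] at h
  | cons a t => simp

-- Python's collapse; the slices ls[:i], ls[i:] (= tail), tail[1:], tail[:k+2], tail[k+2:]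
-- all have nonnegative bounds, so List.take/List.drop are exact here.
def cbCollapse (ls : List String) : List String :=
  match h : cbFindFirst cbOpener ls with
  | none => ls
  | some i =>
    match cbFindFirst cbCloser ((ls.drop i).drop 1) with
    | none => ls.take i ++ [PySem.Str.join " " (ls.drop i)]
    | some k =>
      ls.take i ++ [PySem.Str.join " " ((ls.drop i).take (k + 2))] ++
        cbCollapse ((ls.drop i).drop (k + 2))
termination_by ls.length
decreasing_by
  have := cbFindFirst_ne_nil h
  simp only [List.length_drop]
  omega

def collapse_arrays_py_alt (text : String) : String :=
  PySem.Str.join "\n" (cbCollapse ((PySem.Str.splitlines text).map PySem.Str.strip))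

-- ===== PRECONDITION & SPEC =====
def Spec_collapse_arrays_py (text : String) (out : String) : Prop := out = collapse_arrays_py_alt text
instance (text : String) (out : String) : Decidable (Spec_collapse_arrays_py text out) := by unfold Spec_collapse_arrays_py; infer_instance

-- ===== CLAIM (what is proved, stated in full; the proofs are below) =====
def Claim_equal_collapse_arrays_py : Prop := ∀ (text : String), Dom_collapse_arrays_py text → Spec_collapse_arrays_py text (collapse_arrays_py text)

-- ===== LEMMAS AND PROOFS =====

-- Proof-only intermediate form: A's fold re-expressed as a structural recursion.
def caCollectB : List String → List String → List String × List String
  | [], buf => (buf, [])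
  | l :: rest, buf =>
    if cbCloser l then (buf ++ [l], rest) else caCollectB rest (buf ++ [l])

theorem caCollectB_len (rest : List String) (buf : List String) :
    (caCollectB rest buf).2.length ≤ rest.length := by
  induction rest generalizing buf with
  | nil => simp [caCollectB]
  | cons l t ih =>
    simp only [caCollectB]
    split
    · simp
    · exact le_trans (ih _) (Nat.le_succ _)

def caGoB : List String → List String
  | [] => []
  | l :: rest =>
    if cbOpener l then
      PySem.Str.join " " (caCollectB rest [l]).1 :: caGoB (caCollectB rest [l]).2
    else
      l :: caGoB rest
termination_by ls => ls.length
decreasing_by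
  · exact Nat.lt_succ_of_le (caCollectB_len rest [l])
  · simp

def caFinish (st : List String × Bool × List String) : List String :=
  if st.2.2 ≠ [] then st.1 ++ [PySem.Str.join " " st.2.2] else st.1

theorem caStepA_false (res buf : List String) (l : String) :
    caStepA (res, false, buf) l =
      if cbOpener (PySem.Str.strip l) then (res, true, [PySem.Str.strip l])
      else (res ++ [PySem.Str.strip l], false, buf) := by
  simp [caStepA, cbOpener]

theorem caStepA_true (res buf : List String) (l : String) :
    caStepA (res, true, buf) l =
      if cbCloser (PySem.Str.strip l) then
        (res ++ [PySem.Str.join " " (buf ++ [PySem.Str.strip l])], false, [])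
      else (res, true, buf ++ [PySem.Str.strip l]) := by
  simp [caStepA, cbCloser]

theorem caMain (lines : List String) :
    (∀ res : List String,
      caFinish (lines.foldl caStepA (res, false, [])) =
        res ++ caGoB (lines.map PySem.Str.strip)) ∧
    (∀ (res buf : List String), buf ≠ [] →
      caFinish (lines.foldl caStepA (res, true, buf)) =
        res ++ (PySem.Str.join " " (caCollectB (lines.map PySem.Str.strip) buf).1 ::
                caGoB (caCollectB (lines.map PySem.Str.strip) buf).2)) := by
  induction lines with
  | nil =>
    refine ⟨?_, ?_⟩
    · intro res; simp [caFinish, caGoB]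
    · intro res buf h; simp [caFinish, caCollectB, caGoB, h]
  | cons l rest ih =>
    refine ⟨?_, ?_⟩
    · intro res
      rw [List.foldl_cons, caStepA_false, List.map_cons, caGoB]
      by_cases hc : cbOpener (PySem.Str.strip l) = true
      · rw [if_pos hc, if_pos hc]
        exact ih.2 res [PySem.Str.strip l] (by simp)
      · rw [if_neg hc, if_neg hc, ih.1 (res ++ [PySem.Str.strip l])]
        simp
    · intro res buf hb
      rw [List.foldl_cons, caStepA_true, List.map_cons, caCollectB]
      by_cases hc : cbCloser (PySem.Str.strip l) = true
      · rw [if_pos hc, if_pos hc, ih.1]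
        simp
      · rw [if_neg hc, if_neg hc]
        exact ih.2 res (buf ++ [PySem.Str.strip l]) (by simp)

-- one-step unfolding of cbCollapse without the named discriminant
theorem cbCollapse_unfold (ls : List String) :
    cbCollapse ls =
      match cbFindFirst cbOpener ls with
      | none => ls
      | some i =>
        match cbFindFirst cbCloser ((ls.drop i).drop 1) with
        | none => ls.take i ++ [PySem.Str.join " " (ls.drop i)]
        | some k =>
          ls.take i ++ [PySem.Str.join " " ((ls.drop i).take (k + 2))] ++
            cbCollapse ((ls.drop i).drop (k + 2)) := by
  rw [cbCollapse]
  cases hd : cbFindFirst cbOpener ls <;> simp [hd]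

theorem cbCollapse_nil : cbCollapse [] = [] := by
  rw [cbCollapse_unfold]; simp [cbFindFirst]

-- caCollectB characterized by the first-closer search
theorem caCollectB_char (rest : List String) (buf : List String) :
    caCollectB rest buf =
      match cbFindFirst cbCloser rest with
      | none => (buf ++ rest, [])
      | some k => (buf ++ rest.take (k + 1), rest.drop (k + 1)) := by
  induction rest generalizing buf with
  | nil => simp [caCollectB, cbFindFirst]
  | cons l t ih =>
    rw [caCollectB]
    by_cases hc : cbCloser l = true
    · simp [cbFindFirst, hc]
    · rw [if_neg hc, ih]
      simp only [cbFindFirst, hc, Bool.false_eq_true, if_false]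
      cases hk : cbFindFirst cbCloser t <;> simp [hk]
  
-- cbCollapse skips one non-opener line
theorem cbCollapse_cons_notOpener (l : String) (rest : List String)
    (h : cbOpener l = false) : cbCollapse (l :: rest) = l :: cbCollapse rest := by
  rw [cbCollapse_unfold, cbCollapse_unfold]
  simp only [cbFindFirst, h, Bool.false_eq_true, if_false]
  cases hi : cbFindFirst cbOpener rest with
  | none => simp
  | some i =>
    simp only [hi, Option.map_some, List.drop_succ_cons, List.take_succ_cons]
    cases hk : cbFindFirst cbCloser ((rest.drop i).drop 1) <;> simp [hk]

theorem caGoB_eq_cbCollapse (ls : List String) : caGoB ls = cbCollapse ls := by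
  induction ls using caGoB.induct with
  | case1 => rw [cbCollapse_nil, caGoB]
  | case2 l rest hop ih =>
    rw [caGoB, if_pos hop, ih, cbCollapse_unfold (l :: rest)]
    have hopen : cbFindFirst cbOpener (l :: rest) = some 0 := by
      simp [cbFindFirst, hop]
    rw [caCollectB_char] at *
    simp only [hopen, List.drop_zero, List.take_zero, List.drop_succ_cons, List.nil_append]
    cases hk : cbFindFirst cbCloser rest with
    | none => simp [hk, cbCollapse_nil]
    | some k => simp [hk, List.take_succ_cons, List.drop_succ_cons]
  | case3 l rest hop ih =>
    rw [caGoB, if_neg hop, ih,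
      cbCollapse_cons_notOpener l rest (by simpa using hop)]

-- ===== VERDICT (by name: the statement is the Claim_ definition above) =====
theorem collapse_arrays_py_spec : Claim_equal_collapse_arrays_py := by
  intro text _
  show PySem.Str.join "\n"
      (caFinish ((PySem.Str.splitlines text).foldl caStepA ([], false, []))) = _
  rw [(caMain (PySem.Str.splitlines text)).1 [], caGoB_eq_cbCollapse]
  rfl
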